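-- pv_equiv track=rewrite | github.com/Adoregabriel2005/sc5p2-ptbr | tools/ptm_viewer.py | unswizzle_ps2_clut8
-- ===== SOURCE A (Python) =====
-- def unswizzle_ps2_clut8(palette_data):
--     """Read PS2 8-bit CLUT palette with CSM1 unswizzle."""
--     raw_colors = []
--     num = min(256, len(palette_data) // 4)
--     for i in range(num):
--         r = palette_data[i * 4]
--         g = palette_data[i * 4 + 1]
--         b = palette_data[i * 4 + 2]
--         a = palette_data[i * 4 + 3]
--         a = min(255, a * 2)
--         raw_colors.append((r, g, b, a))
--     while len(raw_colors) < 256: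
--         raw_colors.append((0, 0, 0, 0))
--
--     # CSM1 unswizzle
--     colors = [None] * 256
--     for i in range(256):
--         block = (i // 32) * 32
--         pos_in_block = i % 32
--         row = pos_in_block // 8
--         col = pos_in_block % 8
--         # Swap rows 1 and 2 within each group of 4
--         if row == 1:
--             row = 2
--         elif row == 2:
--             row = 1
--         new_idx = block + row * 8 + col
--         if new_idx < 256:
--             colors[new_idx] = raw_colors[i]
--         else:
--             colors[i] = raw_colors[i]
--     # Fill any None entries
--     for i in range(256):
--         if colors[i] is None:
--             colors[i] = (0, 0, 0, 0)
--     return colors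
-- ===== SOURCE B (Python) =====
-- def _gather(palette_data, num, dst):
--     """Source color for output slot dst: the CSM1 swap is an involution, so the
--     same row-swap formula maps destination index back to source index."""
--     pos = dst % 32
--     row = pos // 8
--     if row == 1:
--         row = 2
--     elif row == 2:
--         row = 1
--     src = (dst // 32) * 32 + row * 8 + pos % 8
--     if src < num:
--         r = palette_data[src * 4]
--         g = palette_data[src * 4 + 1]
--         b = palette_data[src * 4 + 2]
--         a = palette_data[src * 4 + 3]
--         return (r, g, b, min(255, a * 2))
--     return (0, 0, 0, 0)
--
--
-- def unswizzle_ps2_clut8(palette_data):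
--     """Read PS2 8-bit CLUT palette with CSM1 unswizzle (single gather pass)."""
--     num = min(256, len(palette_data) // 4)
--     return [_gather(palette_data, num, dst) for dst in range(256)]
-- ===== Notes on version B (the rewrite author's own statement) =====
-- stated objective: simpler
-- what changed: Replaces A's three passes (build raw_colors, pad to 256, scatter through the permutation into a None-filled table, then fill Nones) with a single output-indexed gather pass, exploiting that the CSM1 row-swap permutation is its own inverse.
import Mathlib
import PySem

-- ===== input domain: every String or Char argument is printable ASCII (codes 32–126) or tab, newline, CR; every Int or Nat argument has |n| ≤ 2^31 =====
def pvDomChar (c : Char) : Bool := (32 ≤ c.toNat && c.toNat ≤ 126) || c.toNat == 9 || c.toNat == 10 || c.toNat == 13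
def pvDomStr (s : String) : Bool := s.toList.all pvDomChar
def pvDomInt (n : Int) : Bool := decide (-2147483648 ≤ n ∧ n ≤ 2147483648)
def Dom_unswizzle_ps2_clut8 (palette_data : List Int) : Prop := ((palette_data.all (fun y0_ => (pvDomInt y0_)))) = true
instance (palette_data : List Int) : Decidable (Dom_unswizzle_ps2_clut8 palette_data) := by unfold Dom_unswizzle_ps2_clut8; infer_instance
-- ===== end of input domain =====

-- B replaces A's four passes (build raw colors, pad, scatter through the CSM1 permutation, fill)
-- with one output-indexed gather pass, using that the row-swap permutation is an involution.


-- ===== PORT A =====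
-- first loop: 'for i in range(num): … raw_colors.append((r,g,b,a))'
-- (indexing via pyGetD: every index this loop produces is in range, so this is exact)
def pvRawLoopA (palette_data : List Int) (num : Int) : List (Int × Int × Int × Int) :=
  (PySem.List.pyRange 0 num 1).foldl (fun acc i =>
    let r := PySem.List.pyGetD palette_data (i * 4) 0
    let g := PySem.List.pyGetD palette_data (i * 4 + 1) 0
    let b := PySem.List.pyGetD palette_data (i * 4 + 2) 0
    let a := PySem.List.pyGetD palette_data (i * 4 + 3) 0
    acc ++ [(r, g, b, min 255 (a * 2))]) []

-- 'while len(raw_colors) < 256: raw_colors.append((0,0,0,0))'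
def pvPadA (acc : List (Int × Int × Int × Int)) : List (Int × Int × Int × Int) :=
  if acc.length < 256 then pvPadA (acc ++ [(0, 0, 0, 0)]) else acc
termination_by 256 - acc.length
decreasing_by simp; omega

-- the CSM1 scatter loop ('colors = [None]*256; for i in range(256): … colors[new_idx] = raw_colors[i]')
def pvScatterA (raw : List (Int × Int × Int × Int)) : List (Option (Int × Int × Int × Int)) :=
  (PySem.List.pyRange 0 256 1).foldl (fun c i =>
    let block := (PySem.Int.floordiv i 32) * 32
    let posInBlock := PySem.Int.mod i 32
    let row0 := PySem.Int.floordiv posInBlock 8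
    let col := PySem.Int.mod posInBlock 8
    let row := if row0 = 1 then 2 else if row0 = 2 then 1 else row0
    let newIdx := block + row * 8 + col
    if newIdx < 256 then PySem.List.pySetD c newIdx (some (PySem.List.pyGetD raw i (0, 0, 0, 0)))
    else PySem.List.pySetD c i (some (PySem.List.pyGetD raw i (0, 0, 0, 0))))
    (List.replicate 256 none)

-- 'for i in range(256): if colors[i] is None: colors[i] = (0,0,0,0)'
def pvFillA (c0 : List (Option (Int × Int × Int × Int))) : List (Option (Int × Int × Int × Int)) :=
  (PySem.List.pyRange 0 256 1).foldl (fun c i =>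
    if PySem.List.pyGetD c i none = none then PySem.List.pySetD c i (some ((0:Int), (0:Int), (0:Int), (0:Int))) else c) c0

def unswizzle_ps2_clut8 (palette_data : List Int) : List (Int × Int × Int × Int) :=
  let num : Int := min 256 (PySem.Int.floordiv (PySem.List.len palette_data) 4)
  let raw := pvPadA (pvRawLoopA palette_data num)
  let colors := pvScatterA raw
  let filled := pvFillA colors
  filled.map (fun o => o.getD (0, 0, 0, 0))

-- ===== PORT B =====
def pvGather (palette_data : List Int) (num : Int) (dst : Int) : Int × Int × Int × Int :=
  let pos := PySem.Int.mod dst 32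
  let row0 := PySem.Int.floordiv pos 8
  let row := if row0 = 1 then 2 else if row0 = 2 then 1 else row0
  let src := (PySem.Int.floordiv dst 32) * 32 + row * 8 + PySem.Int.mod pos 8
  if src < num then
    let r := PySem.List.pyGetD palette_data (src * 4) 0
    let g := PySem.List.pyGetD palette_data (src * 4 + 1) 0
    let b := PySem.List.pyGetD palette_data (src * 4 + 2) 0
    let a := PySem.List.pyGetD palette_data (src * 4 + 3) 0
    (r, g, b, min 255 (a * 2))
  else (0, 0, 0, 0)

def unswizzle_ps2_clut8_alt (palette_data : List Int) : List (Int × Int × Int × Int) :=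
  let num : Int := min 256 (PySem.Int.floordiv (PySem.List.len palette_data) 4)
  (PySem.List.pyRange 0 256 1).map (pvGather palette_data num)

-- ===== PRECONDITION & SPEC =====
def Spec_unswizzle_ps2_clut8 (palette_data : List Int) (out : List (Int × Int × Int × Int)) : Prop := out = unswizzle_ps2_clut8_alt palette_data
instance (palette_data : List Int) (out : List (Int × Int × Int × Int)) : Decidable (Spec_unswizzle_ps2_clut8 palette_data out) := by unfold Spec_unswizzle_ps2_clut8; infer_instance

-- ===== CLAIM (what is proved, stated in full; the proofs are below) =====
def Claim_equal_unswizzle_ps2_clut8 : Prop := ∀ (palette_data : List Int), Dom_unswizzle_ps2_clut8 palette_data → Spec_unswizzle_ps2_clut8 palette_data (unswizzle_ps2_clut8 palette_data)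

-- ===== LEMMAS AND PROOFS =====

-- the CSM1 index permutation (swap rows 1 and 2 within each 32-block); an involution on [0,256)
def pvPerm (i : Int) : Int :=
  let row0 := PySem.Int.floordiv (PySem.Int.mod i 32) 8
  (PySem.Int.floordiv i 32) * 32 + (if row0 = 1 then 2 else if row0 = 2 then 1 else row0) * 8
    + PySem.Int.mod (PySem.Int.mod i 32) 8

-- the color A's first two passes place at raw index i
def pvRawAt (palette_data : List Int) (i : Int) : Int × Int × Int × Int :=
  if i < min 256 (PySem.Int.floordiv (PySem.List.len palette_data) 4) then
    (PySem.List.pyGetD palette_data (i * 4) 0,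
     PySem.List.pyGetD palette_data (i * 4 + 1) 0,
     PySem.List.pyGetD palette_data (i * 4 + 2) 0,
     min 255 (PySem.List.pyGetD palette_data (i * 4 + 3) 0 * 2))
  else (0, 0, 0, 0)

theorem pvGather_eq (pd : List Int) (dst : Int) :
    pvGather pd (min 256 (PySem.Int.floordiv (PySem.List.len pd) 4)) dst
      = pvRawAt pd (pvPerm dst) := rfl

set_option maxRecDepth 40000 in
theorem pvPerm_range : ∀ i ∈ PySem.List.pyRange 0 256 1, 0 ≤ pvPerm i ∧ pvPerm i < 256 := by decide

set_option maxRecDepth 40000 in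
theorem pvPerm_invol : ∀ i ∈ PySem.List.pyRange 0 256 1, pvPerm (((pvPerm i).toNat : Int)) = i := by decide

theorem pvPadA_eq (acc : List (Int × Int × Int × Int)) :
    pvPadA acc = acc ++ List.replicate (256 - acc.length) (0, 0, 0, 0) := by
  fun_induction pvPadA acc with
  | case1 acc h ih =>
      rw [ih, List.append_assoc]
      congr 1
      rw [List.length_append, List.length_cons, List.length_nil,
        show 256 - acc.length = (256 - (acc.length + 0 + 1)) + 1 from by omega, List.replicate_succ]
      rfl
  | case2 acc h => simp at h; simp [Nat.sub_eq_zero_of_le h]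

theorem foldl_set_spec {α : Type} (F : Int → Nat) (g : Int → α) (J : Nat → Int)
    (l : List Int) (c : List α) (j : Nat)
    (hinv : ∀ i ∈ l, J (F i) = i) (hlen : ∀ i ∈ l, F i < c.length) :
    getElem? (l.foldl (fun c i => c.set (F i) (g i)) c) j =
      if J j ∈ l ∧ F (J j) = j then some (g (J j)) else getElem? c j := by
  induction l generalizing c with
  | nil => simp
  | cons a l ih =>
      simp only [List.foldl_cons]
      rw [ih (c.set (F a) (g a)) (fun i hi => hinv i (List.mem_cons_of_mem _ hi))
        (fun i hi => by rw [List.length_set]; exact hlen i (List.mem_cons_of_mem _ hi))]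
      by_cases h1 : J j ∈ l ∧ F (J j) = j
      · simp [h1]
      · by_cases h2 : F a = j
        · have ha : J j = a := by rw [← h2, hinv a (by simp)]
          simp only [ha]
          rw [← h2, List.getElem?_set_self (hlen a (by simp))]
          simp
        · have hc : ¬ (J j ∈ a :: l ∧ F (J j) = j) := by
            rintro ⟨hm, hf⟩
            rcases List.mem_cons.mp hm with h | h
            · exact h2 (h ▸ hf)
            · exact h1 ⟨h, hf⟩
          simp only [h1, if_false, hc, if_false]
          exact List.getElem?_set_ne h2

theorem foldl_set_length {α : Type} (F : Int → Nat) (g : Int → α) (l : List Int) (c : List α) :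
    (l.foldl (fun c i => c.set (F i) (g i)) c).length = c.length := by
  induction l generalizing c with
  | nil => rfl
  | cons a l ih => simp [List.foldl_cons, ih]

theorem pvScatterA_set_form (pd : List Int) :
    pvScatterA ((PySem.List.pyRange 0 256 1).map (pvRawAt pd))
      = (PySem.List.pyRange 0 256 1).foldl
          (fun c i => c.set (pvPerm i).toNat (some (pvRawAt pd i))) (List.replicate 256 none) := by
  unfold pvScatterA
  apply PySem.List.foldl_congr_mem
  intro acc i hi
  have hr := pvPerm_range i hi
  have hm := PySem.List.mem_pyRange_one.mp hi
  show (if pvPerm i < 256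
      then PySem.List.pySetD acc (pvPerm i)
        (some (PySem.List.pyGetD ((PySem.List.pyRange 0 256 1).map (pvRawAt pd)) i (0, 0, 0, 0)))
      else PySem.List.pySetD acc i
        (some (PySem.List.pyGetD ((PySem.List.pyRange 0 256 1).map (pvRawAt pd)) i (0, 0, 0, 0)))) = _
  rw [if_pos hr.2, PySem.List.pySetD_of_nonneg _ _ hr.1,
    PySem.List.pyGetD_map_pyRange_of_nonneg _ _ _ _ hm.1 hm.2]

theorem pvScatterA_spec (pd : List Int) (j : Nat) (hj : j < 256) :
    getElem? (pvScatterA ((PySem.List.pyRange 0 256 1).map (pvRawAt pd))) j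
      = some (some (pvRawAt pd (pvPerm (j : Int)))) := by
  rw [pvScatterA_set_form]
  rw [foldl_set_spec (fun i => (pvPerm i).toNat) (fun i => some (pvRawAt pd i))
    (fun n => pvPerm (n : Int)) _ _ j pvPerm_invol
    (fun i hi => by
      have hr := pvPerm_range i hi
      show (pvPerm i).toNat < (List.replicate (256:Nat) (none : Option (Int × Int × Int × Int))).length
      rw [List.length_replicate]; omega)]
  have hjm : ((j : Int)) ∈ PySem.List.pyRange 0 256 1 :=
    PySem.List.mem_pyRange_one.mpr ⟨by positivity, by exact_mod_cast hj⟩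
  have hpr := pvPerm_range _ hjm
  have hpm : pvPerm (j : Int) ∈ PySem.List.pyRange 0 256 1 :=
    PySem.List.mem_pyRange_one.mpr ⟨hpr.1, hpr.2⟩
  have hinv := pvPerm_invol _ hjm
  have hF : (pvPerm (pvPerm (j : Int))).toNat = j := by
    rw [show pvPerm (pvPerm (j : Int)) = pvPerm (((pvPerm (j : Int)).toNat : Int)) from by
      rw [Int.toNat_of_nonneg hpr.1]]
    rw [pvPerm_invol _ hjm]
    simp
  rw [if_pos ⟨hpm, hF⟩]

theorem pvScatterA_length (pd : List Int) :
    (pvScatterA ((PySem.List.pyRange 0 256 1).map (pvRawAt pd))).length = 256 := by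
  rw [pvScatterA_set_form, foldl_set_length, List.length_replicate]

theorem fill_id (l : List Int) (c : List (Option (Int × Int × Int × Int)))
    (hl : ∀ i ∈ l, 0 ≤ i ∧ i.toNat < c.length) (hc : ∀ x ∈ c, x ≠ none) :
    l.foldl (fun c i => if PySem.List.pyGetD c i none = none
      then PySem.List.pySetD c i (some ((0:Int), (0:Int), (0:Int), (0:Int))) else c) c = c := by
  induction l with
  | nil => rfl
  | cons a l ih =>
      have ha := hl a (by simp)
      have hmem : PySem.List.pyGetD c a none ∈ c := by
        apply PySem.List.pyGetD_mem
        simp only [PySem.Raise.InRange]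
        omega
      rw [List.foldl_cons, if_neg (hc _ hmem)]
      exact ih (fun i hi => hl i (List.mem_cons_of_mem _ hi))

theorem raw_eq (pd : List Int) :
    pvPadA (pvRawLoopA pd (min 256 (PySem.Int.floordiv (PySem.List.len pd) 4)))
      = (PySem.List.pyRange 0 256 1).map (pvRawAt pd) := by
  set num : Int := min 256 (PySem.Int.floordiv (PySem.List.len pd) 4) with hnum
  have h0 : 0 ≤ num := by
    rw [hnum]
    simp only [le_min_iff]
    refine ⟨by norm_num, ?_⟩
    rw [PySem.List.len_eq, show ((4:Int) = ((4:Nat) : Int)) from by norm_num,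
      PySem.Int.floordiv_natCast]
    positivity
  have h256 : num ≤ 256 := min_le_left _ _
  unfold pvRawLoopA
  rw [PySem.List.foldl_append_singleton_eq_map, List.nil_append, pvPadA_eq]
  rw [PySem.List.pyRange_one_append 0 num 256 h0 h256, List.map_append]
  congr 1
  · apply List.map_congr_left
    intro i hi
    have hm := PySem.List.mem_pyRange_one.mp hi
    unfold pvRawAt
    rw [if_pos (hnum ▸ hm.2)]
  · have hlen : ((PySem.List.pyRange 0 num 1).map (fun i =>
        (PySem.List.pyGetD pd (i * 4) 0, PySem.List.pyGetD pd (i * 4 + 1) 0,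
          PySem.List.pyGetD pd (i * 4 + 2) 0, min 255 (PySem.List.pyGetD pd (i * 4 + 3) 0 * 2)))).length
        = num.toNat := by
      rw [List.length_map, PySem.List.length_pyRange_one]; omega
    rw [hlen]
    rw [List.map_congr_left (g := fun _ => ((0:Int), (0:Int), (0:Int), (0:Int)))
      (fun i hi => by
        have hm := PySem.List.mem_pyRange_one.mp hi
        unfold pvRawAt
        rw [if_neg (not_lt.mpr (hnum ▸ hm.1))])]
    rw [List.map_const', PySem.List.length_pyRange_one]
    congr 1; omega

-- ===== VERDICT (by name: the statement is the Claim_ definition above) =====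
theorem unswizzle_ps2_clut8_spec : Claim_equal_unswizzle_ps2_clut8 := by
  intro pd _
  show unswizzle_ps2_clut8 pd = unswizzle_ps2_clut8_alt pd
  unfold unswizzle_ps2_clut8 unswizzle_ps2_clut8_alt
  simp only []
  rw [raw_eq pd]
  set colors := pvScatterA ((PySem.List.pyRange 0 256 1).map (pvRawAt pd)) with hcolors
  have hclen : colors.length = 256 := pvScatterA_length pd
  have hspec : ∀ j : Nat, j < 256 → getElem? colors j = some (some (pvRawAt pd (pvPerm (j : Int)))) :=
    fun j hj => pvScatterA_spec pd j hj
  have hsome : ∀ x ∈ colors, x ≠ none := by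
    intro x hx
    obtain ⟨j, hj, hxe⟩ := List.getElem_of_mem hx
    have := hspec j (hclen ▸ hj)
    rw [List.getElem?_eq_getElem hj, hxe] at this
    simp only [Option.some.injEq] at this
    rw [this]
    simp
  have hfill : pvFillA colors = colors := by
    unfold pvFillA
    exact fill_id _ colors
      (fun i hi => by
        have hm := PySem.List.mem_pyRange_one.mp hi
        exact ⟨hm.1, by rw [hclen]; omega⟩)
      hsome
  rw [hfill]
  apply List.ext_getElem?
  intro j
  by_cases hj : j < 256
  · rw [List.getElem?_map, hspec j hj, List.getElem?_map, PySem.List.getElem?_pyRange_one,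
      if_pos (show j < ((256:Int) - 0).toNat from by simpa using hj), Option.map_some,
      Option.map_some, Option.getD_some,
      show (0 : Int) + (j : Int) = (j : Int) from by ring, pvGather_eq]
  · have h1 : (colors.map (fun o => o.getD ((0:Int), (0:Int), (0:Int), (0:Int)))).length ≤ j := by
      rw [List.length_map, hclen]; omega
    have h2 : (((PySem.List.pyRange 0 256 1).map
        (pvGather pd (min 256 (PySem.Int.floordiv (PySem.List.len pd) 4))))).length ≤ j := by
      rw [List.length_map, PySem.List.length_pyRange_one]; omega
    rw [List.getElem?_eq_none h1, List.getElem?_eq_none h2]
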